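-- pv_equiv track=rewrite | github.com/rbhattad31/3-way-po-recon | apps/procurement/agents/RFQ_Generator_Agent.py | _normalize_system_code
-- ===== SOURCE A (Python) =====
-- from typing import Any, Dict, List, Optional, Tuple
--
-- _SCOPE_CODE_MAP: List[Tuple[str, str]] = [
--     ("VRF",               "VRF"),
--     ("VARIABLE REFRIGERANT", "VRF"),
--     ("CHILLER",           "CHILLER"),
--     ("CHILLED WATER",     "CHILLER"),
--     ("FCU_CW",            "FCU"),
--     ("FCU",               "FCU"),
--     ("FAN COIL",          "FCU"),
--     ("CASSETTE",          "CASSETTE"),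
--     ("PACKAGED_DX",       "PACKAGED_DX"),
--     ("PACKAGED DX",       "PACKAGED_DX"),
--     ("PACKAGED UNIT",     "PACKAGED_DX"),
--     ("PACKAGED",          "PACKAGED_DX"),
--     ("SPLIT_AC",          "SPLIT_AC"),
--     ("SPLIT AC",          "SPLIT_AC"),
--     ("SPLIT AIR",         "SPLIT_AC"),
--     ("SPLIT",             "SPLIT_AC"),
--     ("AHU",               "AHU"),
--     ("AIR HANDLING",      "AHU"),
-- ]
--
-- def _normalize_system_code(raw: str) -> str:
--     """Resolve any text representation of an HVAC system name to its
--     canonical system_type key (e.g. 'Split Air Conditioning' -> 'SPLIT_AC').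
--
--     Falls back to returning the input uppercased when no known keyword matches.
--     """
--     if not raw:
--         raise ValueError("HVAC system code is required for RFQ generation.")
--     _u = raw.strip().upper()
--     # 1. Exact match
--     for _kw, _code in _SCOPE_CODE_MAP:
--         if _u == _kw:
--             return _code
--     # 2. Startswith
--     for _kw, _code in _SCOPE_CODE_MAP:
--         if _u.startswith(_kw):
--             return _code
--     # 3. Contains
--     for _kw, _code in _SCOPE_CODE_MAP:
--         if _kw in _u:
--             return _code
--     return _u   # valid DB key already (caller's responsibility)
-- ===== SOURCE B (Python) =====
-- from typing import List, Tuple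
--
-- _SCOPE_CODE_MAP: List[Tuple[str, str]] = [
--     ("VRF",               "VRF"),
--     ("VARIABLE REFRIGERANT", "VRF"),
--     ("CHILLER",           "CHILLER"),
--     ("CHILLED WATER",     "CHILLER"),
--     ("FCU_CW",            "FCU"),
--     ("FCU",               "FCU"),
--     ("FAN COIL",          "FCU"),
--     ("CASSETTE",          "CASSETTE"),
--     ("PACKAGED_DX",       "PACKAGED_DX"),
--     ("PACKAGED DX",       "PACKAGED_DX"),
--     ("PACKAGED UNIT",     "PACKAGED_DX"),
--     ("PACKAGED",          "PACKAGED_DX"),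
--     ("SPLIT_AC",          "SPLIT_AC"),
--     ("SPLIT AC",          "SPLIT_AC"),
--     ("SPLIT AIR",         "SPLIT_AC"),
--     ("SPLIT",             "SPLIT_AC"),
--     ("AHU",               "AHU"),
--     ("AIR HANDLING",      "AHU"),
-- ]
--
-- def _rank(u, kw):
--     """0 = exact, 1 = prefix, 2 = substring, None = no match."""
--     if u == kw:
--         return 0
--     if u.startswith(kw):
--         return 1
--     if kw in u:
--         return 2
--     return None
--
-- def _normalize_system_code(raw: str) -> str:
--     if not raw:
--         raise ValueError("HVAC system code is required for RFQ generation.")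
--     _u = raw.strip().upper()
--     best = None  # (code, rank); single pass, best (lowest) rank wins, first-found on ties
--     for _kw, _code in _SCOPE_CODE_MAP:
--         r = _rank(_u, _kw)
--         if r == 0:
--             return _code  # exact match cannot be beaten
--         if r is not None and (best is None or r < best[1]):
--             best = (_code, r)
--     return best[0] if best is not None else _u
-- ===== Notes on version B (the rewrite author's own statement) =====
-- stated objective: simpler
-- what changed: Replaced A's three sequential full scans of _SCOPE_CODE_MAP (exact, then startswith, then contains) by a single pass that keeps a best-so-far (code, rank) with rank 0/1/2, replacing only on strictly better rank and returning immediately on an exact match.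
import Mathlib
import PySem

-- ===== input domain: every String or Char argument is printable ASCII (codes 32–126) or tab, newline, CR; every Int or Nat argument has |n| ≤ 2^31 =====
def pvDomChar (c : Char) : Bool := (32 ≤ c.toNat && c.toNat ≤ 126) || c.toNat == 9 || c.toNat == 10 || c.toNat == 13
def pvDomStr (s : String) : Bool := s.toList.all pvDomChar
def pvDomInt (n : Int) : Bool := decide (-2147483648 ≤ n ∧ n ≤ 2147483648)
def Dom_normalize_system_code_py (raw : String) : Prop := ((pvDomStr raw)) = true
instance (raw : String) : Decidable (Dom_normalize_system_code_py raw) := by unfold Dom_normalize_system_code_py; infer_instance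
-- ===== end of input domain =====

-- B replaces A's three sequential scans of _SCOPE_CODE_MAP by one pass that keeps the
-- best-ranked match so far (0 exact / 1 prefix / 2 substring); same result, simpler shape.

-- ===== PORT A =====
def scopeCodeMap : List (String × String) := [
  ("VRF",               "VRF"),
  ("VARIABLE REFRIGERANT", "VRF"),
  ("CHILLER",           "CHILLER"),
  ("CHILLED WATER",     "CHILLER"),
  ("FCU_CW",            "FCU"),
  ("FCU",               "FCU"),
  ("FAN COIL",          "FCU"),
  ("CASSETTE",          "CASSETTE"),
  ("PACKAGED_DX",       "PACKAGED_DX"),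
  ("PACKAGED DX",       "PACKAGED_DX"),
  ("PACKAGED UNIT",     "PACKAGED_DX"),
  ("PACKAGED",          "PACKAGED_DX"),
  ("SPLIT_AC",          "SPLIT_AC"),
  ("SPLIT AC",          "SPLIT_AC"),
  ("SPLIT AIR",         "SPLIT_AC"),
  ("SPLIT",             "SPLIT_AC"),
  ("AHU",               "AHU"),
  ("AIR HANDLING",      "AHU")]

-- loop 1 of A: first entry whose keyword equals _u
def aScanEq (u : String) : List (String × String) → Option String
  | [] => none
  | (kw, code) :: rest => if u == kw then some code else aScanEq u rest

-- loop 2 of A: first entry whose keyword is a prefix of _u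
def aScanSW (u : String) : List (String × String) → Option String
  | [] => none
  | (kw, code) :: rest => if PySem.Str.startswith u kw then some code else aScanSW u rest

-- loop 3 of A: first entry whose keyword occurs in _u
def aScanIn (u : String) : List (String × String) → Option String
  | [] => none
  | (kw, code) :: rest => if PySem.Str.isIn kw u then some code else aScanIn u rest

def normalize_system_code_py (raw : String) : String :=
  let u := PySem.Str.upper (PySem.Str.strip raw)
  match aScanEq u scopeCodeMap with
  | some c => c
  | none =>
    match aScanSW u scopeCodeMap with
    | some c => c
    | none =>
      match aScanIn u scopeCodeMap with
      | some c => c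
      | none => u

-- ===== PORT B =====
-- 0 = exact, 1 = prefix, 2 = substring, none = no match
def bRank (u kw : String) : Option Nat :=
  if u == kw then some 0
  else if PySem.Str.startswith u kw then some 1
  else if PySem.Str.isIn kw u then some 2
  else none

-- B's single loop: best-so-far (code, rank); exact match returns immediately;
-- replace only on strictly better rank (first-found wins on ties).
def bLoop (u : String) (best : Option (String × Nat)) : List (String × String) → Option String
  | [] => best.map Prod.fst
  | (kw, code) :: rest =>
    match bRank u kw with
    | some 0 => some code
    | some r =>
      match best with
      | none => bLoop u (some (code, r)) rest
      | some (bc, br) => if r < br then bLoop u (some (code, r)) rest else bLoop u (some (bc, br)) rest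
    | none => bLoop u best rest

def normalize_system_code_py_alt (raw : String) : String :=
  let u := PySem.Str.upper (PySem.Str.strip raw)
  (bLoop u none scopeCodeMap).getD u

-- ===== PRECONDITION & SPEC =====
-- A raises ValueError on the empty string (the only falsy str); B raises there too.
def Pre_normalize_system_code_py (raw : String) : Prop := raw ≠ ""
instance (raw : String) : Decidable (Pre_normalize_system_code_py raw) := by unfold Pre_normalize_system_code_py; infer_instance
def pvWitness_normalize_system_code_py : String := "split air conditioning"

def Spec_normalize_system_code_py (raw : String) (out : String) : Prop := out = normalize_system_code_py_alt raw
instance (raw : String) (out : String) : Decidable (Spec_normalize_system_code_py raw out) := by unfold Spec_normalize_system_code_py; infer_instance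

-- ===== CLAIM (what is proved, stated in full; the proofs are below) =====
def Claim_equal_normalize_system_code_py : Prop := ∀ (raw : String), Dom_normalize_system_code_py raw → Pre_normalize_system_code_py raw → Spec_normalize_system_code_py raw (normalize_system_code_py raw)

-- ===== LEMMAS AND PROOFS =====

-- with best rank 1 in hand, only a later exact match can change the answer
theorem bLoop_best1 (u c : String) (l : List (String × String)) :
    bLoop u (some (c, 1)) l = some ((aScanEq u l).getD c) := by
  induction l generalizing c with
  | nil => rfl
  | cons p rest ih =>
    obtain ⟨kw, code⟩ := p
    simp only [bLoop, bRank, aScanEq]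
    by_cases h0 : u == kw
    · simp [h0]
    · by_cases h1 : PySem.Chars.startswith u.toList kw.toList = true
      · simp [h0, h1, ih]
      · by_cases h2 : PySem.Chars.isIn kw.toList u.toList = true
        · simp [h0, h1, h2, ih]
        · simp [h0, h1, h2, ih]

-- with best rank 2 in hand, a later exact or prefix match can still change the answer
theorem bLoop_best2 (u c : String) (l : List (String × String)) :
    bLoop u (some (c, 2)) l = some (((aScanEq u l).or (aScanSW u l)).getD c) := by
  induction l generalizing c with
  | nil => rfl
  | cons p rest ih =>
    obtain ⟨kw, code⟩ := p
    simp only [bLoop, bRank, aScanEq, aScanSW]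
    by_cases h0 : u == kw
    · simp [h0]
    · by_cases h1 : PySem.Chars.startswith u.toList kw.toList = true
      · simp [h0, h1, bLoop_best1]
      · by_cases h2 : PySem.Chars.isIn kw.toList u.toList = true
        · simp [h0, h1, h2, ih]
        · simp [h0, h1, h2, ih]

-- the single pass with no best yet computes exactly A's three-scan cascade
theorem bLoop_none (u : String) (l : List (String × String)) :
    bLoop u none l = ((aScanEq u l).or ((aScanSW u l).or (aScanIn u l))) := by
  induction l with
  | nil => rfl
  | cons p rest ih =>
    obtain ⟨kw, code⟩ := p
    simp only [bLoop, bRank, aScanEq, aScanSW, aScanIn]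
    by_cases h0 : u == kw
    · simp [h0]
    · by_cases h1 : PySem.Chars.startswith u.toList kw.toList = true
      · simp [h0, h1, bLoop_best1]
      · by_cases h2 : PySem.Chars.isIn kw.toList u.toList = true
        · simp [h0, h1, h2, bLoop_best2]
        · simp [h0, h1, h2, ih]

-- A's three-match cascade, written as one Option expression
theorem cascade (u : String) (l : List (String × String)) :
    (match aScanEq u l with
     | some c => c
     | none =>
       match aScanSW u l with
       | some c => c
       | none =>
         match aScanIn u l with
         | some c => c
         | none => u) = ((aScanEq u l).or ((aScanSW u l).or (aScanIn u l))).getD u := by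
  cases aScanEq u l <;> cases aScanSW u l <;> cases aScanIn u l <;> simp

-- ===== VERDICT (by name: the statement is the Claim_ definition above) =====
theorem normalize_system_code_py_spec : Claim_equal_normalize_system_code_py := by
  intro raw _ _
  show normalize_system_code_py raw = normalize_system_code_py_alt raw
  simp only [normalize_system_code_py, normalize_system_code_py_alt, bLoop_none, cascade]
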